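-- pv_equiv track=rewrite | github.com/changliao1025/pyearthmesh | pyearthmesh/utility/healpix_zone.py | generate_healpix_zone_name
-- ===== SOURCE A (Python) =====
-- import math
-- from typing import List
--
-- def _is_power_of_two(n: int) -> bool:
--     return n > 0 and (n & (n - 1)) == 0
--
-- def generate_healpix_zone_name(
--     nside: int,
--     pix: int,
--     nest: bool = True,
--     hierarchical: bool = False,
--     prefix: str = "HPX",
--     pad_pix: bool = True,
-- ) -> str:
--     """Generate a readable zone name for a HEALPix pixel.
--
--     Parameters
--     - nside: HEALPix NSIDE (must be a power of two)
--     - pix: pixel index (0 <= pix < 12*nside**2)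
--     - nest: whether the pixel index uses NESTED ordering (default True)
--     - hierarchical: when True and `nest` is True, include a hierarchical
--       path from the 12 base faces down to the requested pixel (uses successive
--       integer division by 4 to determine parents/children)
--     - prefix: textual prefix for the label (default "HPX")
--     - pad_pix: pad pixel number with zeros to a fixed width based on nside
--
--     Returns a short, readable string such as:
--       HPX_n4_f3-01-2_pix37_nest
--
--     Hierarchical example (nside=4):
--       HPX_n4_f3-c0c1c2_pix37_nest  (where c0..c2 are child indices 0..3)
--
--     Raises ValueError for invalid inputs.
--     """
--     if not _is_power_of_two(nside):
--         raise ValueError("nside must be a power of two")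
--
--     npix = 12 * (nside ** 2)
--     if not (0 <= pix < npix):
--         raise ValueError(f"pix must be in [0, {npix})")
--
--     # Basic parts
--     pad_width = len(str(npix - 1)) if pad_pix else 0
--     pix_str = str(pix).zfill(pad_width) if pad_width else str(pix)
--
--     if hierarchical and not nest:
--         raise ValueError("hierarchical labels are only supported for nest=True")
--
--     parts: List[str] = [f"{prefix}_n{nside}"]
--
--     if hierarchical and nest:
--         # Number of subdivision levels relative to nside=1
--         levels = int(math.log2(nside)) if nside > 1 else 0
--         # Top-level face index at nside=1
--         face = pix // (4 ** levels) if levels > 0 else pix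
--         children: List[int] = []
--         for j in range(levels, 0, -1):
--             child = (pix // (4 ** (j - 1))) % 4
--             children.append(int(child))
--
--         parts.append(f"f{face}")
--         if children:
--             parts.append("c" + "".join(str(c) for c in children))
--     else:
--         # Non-hierarchical label: include pixel index
--         parts.append(f"pix{pix_str}")
--
--     # Suffix to indicate ordering
--     order = "nest" if nest else "ring"
--
--     label = "-".join(parts) + f"_{order}"
--     # If hierarchical, also show the final pixel index for clarity
--     if hierarchical and nest:
--         label = "-".join(parts + [f"pix{pix_str}"]) + f"_{order}"
--
--     return label
-- ===== SOURCE B (Python) =====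
-- def generate_healpix_zone_name(
--     nside: int,
--     pix: int,
--     nest: bool = True,
--     hierarchical: bool = False,
--     prefix: str = "HPX",
--     pad_pix: bool = True,
-- ) -> str:
--     """Same label as A, but the hierarchical face/child path is read off the
--     binary string of pix: the face is the top 4 bits and each child index is a
--     two-bit slice, instead of per-level powers and floor divisions."""
--     if nside <= 0 or nside & (nside - 1):
--         raise ValueError("nside must be a power of two")
--     npix = 12 * nside * nside
--     if not 0 <= pix < npix:
--         raise ValueError(f"pix must be in [0, {npix})")
--     if hierarchical and not nest:
--         raise ValueError("hierarchical labels are only supported for nest=True")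
--
--     pix_str = str(pix).zfill(len(str(npix - 1))) if pad_pix else str(pix)
--     suffix = "_nest" if nest else "_ring"
--
--     if hierarchical:  # nest is True here
--         levels = nside.bit_length() - 1
--         # pix < 12 * 4**levels < 2**(2*levels + 4), so the padded binary
--         # string has the 4 face bits followed by levels two-bit child slices.
--         bits = bin(pix)[2:].zfill(2 * levels + 4)
--         label = f"{prefix}_n{nside}-f{int(bits[:4], 2)}"
--         if levels:
--             label += "-c" + "".join(
--                 str(int(bits[4 + 2 * i : 6 + 2 * i], 2)) for i in range(levels))
--         return label + f"-pix{pix_str}" + suffix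
--     return f"{prefix}_n{nside}-pix{pix_str}" + suffix
-- ===== Notes on version B (the rewrite author's own statement) =====
-- stated objective: alternative
-- what changed: The hierarchical kernel no longer computes face and children arithmetically with per-level powers 4**(j-1), floor division and modulus: B converts pix once to a zero-padded binary string and reads the label off it by string slicing (top 4 bits parsed as the face, each successive two-bit slice parsed as a child index), assembling the label by direct concatenation instead of A's parts list joined twice.
import Mathlib
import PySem

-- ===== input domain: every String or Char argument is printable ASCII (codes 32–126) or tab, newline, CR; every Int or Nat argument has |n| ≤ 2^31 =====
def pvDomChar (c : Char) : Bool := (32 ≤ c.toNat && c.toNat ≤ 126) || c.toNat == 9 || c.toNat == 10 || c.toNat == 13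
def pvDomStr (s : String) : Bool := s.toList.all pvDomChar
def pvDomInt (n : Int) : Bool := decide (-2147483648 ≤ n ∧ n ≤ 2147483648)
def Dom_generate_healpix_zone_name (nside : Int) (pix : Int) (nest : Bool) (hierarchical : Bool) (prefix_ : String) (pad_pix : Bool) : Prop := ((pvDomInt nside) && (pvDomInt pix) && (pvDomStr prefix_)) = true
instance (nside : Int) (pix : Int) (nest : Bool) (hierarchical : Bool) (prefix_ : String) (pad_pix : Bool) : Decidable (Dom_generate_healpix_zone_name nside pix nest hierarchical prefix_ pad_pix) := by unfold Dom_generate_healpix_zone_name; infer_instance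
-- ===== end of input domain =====

-- B reads the hierarchical face/child path off the zero-padded binary string of pix (top 4 bits =
-- face, successive two-bit slices = child indices) instead of A's per-level powers 4**(j-1) with
-- floor division and modulus; equal return value on Pre_.


-- ===== PORT A =====
-- helper _is_power_of_two
def pvIsPowerOfTwo (n : Int) : Bool :=
  decide (n > 0) && decide (PySem.Int.band n (n - 1) = 0)

-- Port of A. On inputs where A raises ValueError (excluded by Pre_) it returns "".
-- `int(math.log2(nside))` is ported as Nat.log2 of nside: exact, because on the path taken nside is a
-- power of two (float log2 is exact there).  `4 ** levels` / `4 ** (j - 1)` are ported with `.toNat`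
-- exponents: exact since levels ≥ 0 and j ≥ 1 on the paths taken.
def generate_healpix_zone_name (nside : Int) (pix : Int) (nest : Bool) (hierarchical : Bool) (prefix_ : String) (pad_pix : Bool) : String :=
  if pvIsPowerOfTwo nside = false then ""   -- raise ValueError
  else
    let npix : Int := 12 * nside ^ 2
    if ¬ (0 ≤ pix ∧ pix < npix) then ""     -- raise ValueError
    else
      let pad_width : Int := if pad_pix then PySem.Str.len (PySem.Int.toStr (npix - 1)) else 0
      let pix_str : String := if pad_width ≠ 0 then PySem.Str.zfill (PySem.Int.toStr pix) pad_width else PySem.Int.toStr pix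
      if hierarchical && !nest then ""      -- raise ValueError
      else
        let parts0 : List String := [prefix_ ++ "_n" ++ PySem.Int.toStr nside]
        let parts : List String :=
          if hierarchical && nest then
            let levels : Int := if nside > 1 then ((Nat.log2 nside.toNat : Nat) : Int) else 0
            let face : Int := if levels > 0 then PySem.Int.floordiv pix ((4 : Int) ^ levels.toNat) else pix
            let children : List Int :=
              (PySem.List.pyRange levels 0 (-1)).foldl
                (fun acc j => acc ++ [PySem.Int.mod (PySem.Int.floordiv pix ((4 : Int) ^ (j - 1).toNat)) 4]) []
            let parts1 := parts0 ++ ["f" ++ PySem.Int.toStr face]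
            if children ≠ [] then parts1 ++ ["c" ++ PySem.Str.join "" (children.map PySem.Int.toStr)] else parts1
          else
            parts0 ++ ["pix" ++ pix_str]
        let order : String := if nest then "nest" else "ring"
        let label : String := PySem.Str.join "-" parts ++ "_" ++ order
        let label : String :=
          if hierarchical && nest then PySem.Str.join "-" (parts ++ ["pix" ++ pix_str]) ++ "_" ++ order
          else label
        label

-- ===== PORT B =====
-- bin(n)[2:] for n ≥ 0 (hand port of bin(): exact on nonnegative arguments, the only ones it receives)
def pvBinRev : Nat → List Char
  | 0 => []
  | n + 1 => (if (n + 1) % 2 = 1 then '1' else '0') :: pvBinRev ((n + 1) / 2)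
decreasing_by omega

def pvBin (n : Nat) : List Char := if n = 0 then ['0'] else (pvBinRev n).reverse

-- int(s, 2) (hand port: exact on nonempty strings of binary digits, the only ones it receives)
def pvParseBin (cs : List Char) : Nat := cs.foldl (fun a c => 2 * a + (c.toNat - 48)) 0

-- Port of B (Source B).  On inputs where Source B raises ValueError (excluded by Pre_) it returns "".
def generate_healpix_zone_name_alt (nside : Int) (pix : Int) (nest : Bool) (hierarchical : Bool) (prefix_ : String) (pad_pix : Bool) : String :=
  if nside ≤ 0 ∨ PySem.Int.band nside (nside - 1) ≠ 0 then ""   -- raise ValueError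
  else
    let npix : Int := 12 * nside * nside
    if ¬ (0 ≤ pix ∧ pix < npix) then ""                          -- raise ValueError
    else if hierarchical && !nest then ""                        -- raise ValueError
    else
      let pix_str : String := if pad_pix then PySem.Str.zfill (PySem.Int.toStr pix) (PySem.Str.len (PySem.Int.toStr (npix - 1))) else PySem.Int.toStr pix
      let suffix : String := if nest then "_nest" else "_ring"
      if hierarchical then
        let levels : Nat := PySem.Int.bitLength nside - 1
        let bits : List Char := PySem.Chars.zfill (pvBin pix.toNat) (2 * (levels : Int) + 4)
        let label : String := prefix_ ++ "_n" ++ PySem.Int.toStr nside ++ "-f" ++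
          PySem.Int.toStr ((pvParseBin (PySem.List.slice bits none (some 4)) : Nat) : Int)
        let label : String :=
          if levels ≠ 0 then
            label ++ "-c" ++ PySem.Str.join "" ((List.range levels).map (fun i =>
              PySem.Int.toStr ((pvParseBin (PySem.List.slice bits (some ((4 + 2 * i : Nat) : Int)) (some ((6 + 2 * i : Nat) : Int))) : Nat) : Int)))
          else label
        label ++ "-pix" ++ pix_str ++ suffix
      else
        prefix_ ++ "_n" ++ PySem.Int.toStr nside ++ "-pix" ++ pix_str ++ suffix

-- ===== PRECONDITION & SPEC =====
-- Pre_ excludes exactly the inputs on which A raises ValueError: nside not a power of two (stated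
-- closed-form as 2^log2(nside) = nside), pix outside [0, 12*nside^2), or hierarchical without nest.
def Pre_generate_healpix_zone_name (nside : Int) (pix : Int) (nest : Bool) (hierarchical : Bool) (prefix_ : String) (pad_pix : Bool) : Prop :=
  0 < nside ∧ (2 : Int) ^ Nat.log2 nside.toNat = nside ∧ 0 ≤ pix ∧ pix < 12 * nside ^ 2 ∧ (hierarchical = true → nest = true)
instance (nside : Int) (pix : Int) (nest : Bool) (hierarchical : Bool) (prefix_ : String) (pad_pix : Bool) : Decidable (Pre_generate_healpix_zone_name nside pix nest hierarchical prefix_ pad_pix) := by unfold Pre_generate_healpix_zone_name; infer_instance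

def pvWitness_generate_healpix_zone_name : Int × Int × Bool × Bool × String × Bool := (4, 37, true, true, "HPX", true)

def Spec_generate_healpix_zone_name (nside : Int) (pix : Int) (nest : Bool) (hierarchical : Bool) (prefix_ : String) (pad_pix : Bool) (out : String) : Prop := out = generate_healpix_zone_name_alt nside pix nest hierarchical prefix_ pad_pix
instance (nside : Int) (pix : Int) (nest : Bool) (hierarchical : Bool) (prefix_ : String) (pad_pix : Bool) (out : String) : Decidable (Spec_generate_healpix_zone_name nside pix nest hierarchical prefix_ pad_pix out) := by unfold Spec_generate_healpix_zone_name; infer_instance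

-- ===== CLAIM (what is proved, stated in full; the proofs are below) =====
def Claim_equal_generate_healpix_zone_name : Prop := ∀ (nside : Int) (pix : Int) (nest : Bool) (hierarchical : Bool) (prefix_ : String) (pad_pix : Bool), Dom_generate_healpix_zone_name nside pix nest hierarchical prefix_ pad_pix → Pre_generate_healpix_zone_name nside pix nest hierarchical prefix_ pad_pix → Spec_generate_healpix_zone_name nside pix nest hierarchical prefix_ pad_pix (generate_healpix_zone_name nside pix nest hierarchical prefix_ pad_pix)

-- ===== LEMMAS AND PROOFS =====

-- str(n) is never the empty string
lemma pv_toDigitsCore_ne_nil (b fuel n : Nat) (ds : List Char) (h : ds ≠ []) :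
    Nat.toDigitsCore b fuel n ds ≠ [] := by
  induction fuel generalizing n ds with
  | zero => simpa [Nat.toDigitsCore] using h
  | succ f ih =>
      rw [Nat.toDigitsCore]
      split
      · simp
      · exact ih _ _ (by simp)

lemma pv_toStr_toList_ne_nil (n : Int) : (PySem.Int.toStr n).toList ≠ [] := by
  rw [PySem.Int.toList_toStr]
  unfold PySem.Int.toChars
  split
  · simp
  · unfold Nat.toDigits
    rw [Nat.toDigitsCore]
    split
    · simp
    · exact pv_toDigitsCore_ne_nil _ _ _ _ (by simp)

lemma pv_len_toStr_ne (n : Int) : PySem.Str.len (PySem.Int.toStr n) ≠ 0 := by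
  rw [PySem.Str.len_eq]
  have := pv_toStr_toList_ne_nil n
  simpa using this

-- power-of-two scalar facts
lemma pv_band_pow (k : Nat) : PySem.Int.band ((2 : Int) ^ k) ((2 : Int) ^ k - 1) = 0 := by
  have h1 : ((2 : Int) ^ k) = ((2 ^ k : Nat) : Int) := by push_cast; ring
  have h2 : ((2 : Int) ^ k - 1) = ((2 ^ k - 1 : Nat) : Int) := by
    have : (1 : Nat) ≤ 2 ^ k := Nat.one_le_two_pow
    push_cast [this]; ring
  rw [h2, h1, PySem.Int.band_natCast]
  have : (2 ^ k) &&& (2 ^ k - 1) = 0 := by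
    apply Nat.eq_of_testBit_eq
    intro i
    simp
  simp [this]

lemma pv_bitLength_pow (k : Nat) : PySem.Int.bitLength ((2 : Int) ^ k) = k + 1 := by
  induction k with
  | zero => decide
  | succ m ih =>
      have h1 : ((2 : Int) ^ (m + 1)) = ((2 ^ (m + 1) : Nat) : Int) := by push_cast; ring
      have h2 : (2 ^ (m + 1) : Nat) / 2 = 2 ^ m := by
        rw [pow_succ, Nat.mul_div_cancel _ (by norm_num)]
      rw [h1, PySem.Int.bitLength_natCast (by positivity), h2]
      have h3 : ((2 ^ m : Nat) : Int) = (2 : Int) ^ m := by push_cast; ring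
      rw [h3, ih]

-- ---- the binary-string kernel of B ----

def pvBinStep : Nat → Char → Nat := fun a c => 2 * a + (c.toNat - 48)

lemma pv_parseBin_eq (cs : List Char) : pvParseBin cs = cs.foldl pvBinStep 0 := rfl

def pvIsBinL (cs : List Char) : Prop := ∀ c ∈ cs, c = '0' ∨ c = '1'

lemma pv_foldl_acc (cs : List Char) (a : Nat) :
    cs.foldl pvBinStep a = a * 2 ^ cs.length + cs.foldl pvBinStep 0 := by
  induction cs generalizing a with
  | nil => simp
  | cons c cs ih =>
      simp only [List.foldl_cons, List.length_cons]
      rw [ih (pvBinStep a c), ih (pvBinStep 0 c)]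
      simp only [pvBinStep]
      ring

lemma pv_parse_append (u v : List Char) :
    pvParseBin (u ++ v) = pvParseBin u * 2 ^ v.length + pvParseBin v := by
  simp only [pv_parseBin_eq, List.foldl_append]
  rw [pv_foldl_acc v (u.foldl pvBinStep 0)]

lemma pv_parse_lt (cs : List Char) (h : pvIsBinL cs) : pvParseBin cs < 2 ^ cs.length := by
  induction cs with
  | nil => simp [pvParseBin]
  | cons c cs ih =>
      have hc := h c (by simp)
      have hcs : pvIsBinL cs := fun x hx => h x (by simp [hx])
      have h1 : pvParseBin (c :: cs) = (c.toNat - 48) * 2 ^ cs.length + pvParseBin cs := by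
        simp only [pv_parseBin_eq, List.foldl_cons]
        rw [pv_foldl_acc cs (pvBinStep 0 c)]
        simp [pvBinStep]
      have hd : c.toNat - 48 ≤ 1 := by rcases hc with h | h <;> subst h <;> decide
      have h2 := ih hcs
      have h3 : (c.toNat - 48) * 2 ^ cs.length ≤ 1 * 2 ^ cs.length :=
        Nat.mul_le_mul_right _ hd
      simp only [List.length_cons, pow_succ]
      omega

lemma pvBinRev_isBin (n : Nat) : pvIsBinL (pvBinRev n) := by
  induction n using Nat.strong_induction_on with
  | _ n ih =>
      match n with
      | 0 => intro c hc; simp [pvBinRev] at hc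
      | m + 1 =>
          intro c hc
          rw [pvBinRev] at hc
          rcases List.mem_cons.mp hc with h | h
          · subst h; split <;> simp
          · exact ih ((m + 1) / 2) (by omega) c h

lemma pvBinRev_val (n : Nat) : pvParseBin (pvBinRev n).reverse = n := by
  induction n using Nat.strong_induction_on with
  | _ n ih =>
      match n with
      | 0 => simp [pvBinRev, pvParseBin]
      | m + 1 =>
          rw [pvBinRev, List.reverse_cons, pv_parse_append]
          rw [ih ((m + 1) / 2) (by omega)]
          have hbit : pvParseBin [if (m + 1) % 2 = 1 then '1' else '0'] = (m + 1) % 2 := by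
            rcases Nat.mod_two_eq_zero_or_one (m + 1) with h | h <;> simp [pvParseBin, pvBinStep, h]
          rw [hbit]
          simp only [List.length_cons, List.length_nil, pow_one]
          omega

lemma pvBinRev_len_le (t n : Nat) (h : n < 2 ^ t) : (pvBinRev n).length ≤ t := by
  induction t generalizing n with
  | zero =>
      interval_cases n
      simp [pvBinRev]
  | succ t ih =>
      match n with
      | 0 => simp [pvBinRev]
      | m + 1 =>
          rw [pvBinRev]
          simp only [List.length_cons]
          have : (m + 1) / 2 < 2 ^ t := by
            rw [pow_succ] at h; omega
          have := ih ((m + 1) / 2) this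
          omega

lemma pvBin_isBin (n : Nat) : pvIsBinL (pvBin n) := by
  unfold pvBin
  split
  · intro c hc; simp at hc; simp [hc]
  · intro c hc
    exact pvBinRev_isBin n c (List.mem_reverse.mp hc)

lemma pvBin_val (n : Nat) : pvParseBin (pvBin n) = n := by
  unfold pvBin
  split
  · subst ‹n = 0›; simp [pvParseBin, pvBinStep]
  · exact pvBinRev_val n

lemma pvBin_len_le (t n : Nat) (ht : 1 ≤ t) (h : n < 2 ^ t) : (pvBin n).length ≤ t := by
  unfold pvBin
  split
  · simpa using ht
  · simpa using pvBinRev_len_le t n h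

lemma pvBin_ne_nil (n : Nat) : pvBin n ≠ [] := by
  unfold pvBin
  split
  · simp
  · simp only [ne_eq, List.reverse_eq_nil_iff]
    match n, ‹¬ n = 0› with
    | m + 1, _ => rw [pvBinRev]; simp

-- zfill on an unsigned digit string is plain left-padding with '0'
lemma pv_zfill_bin (cs : List Char) (w : Int) (h : pvIsBinL cs) (hne : cs ≠ []) :
    PySem.Chars.zfill cs w = List.replicate (w.toNat - cs.length) '0' ++ cs := by
  unfold PySem.Chars.zfill
  split
  · have : w.toNat ≤ cs.length := by omega
    simp [Nat.sub_eq_zero_of_le this]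
  · match cs, hne with
    | c :: rest, _ =>
        have hc := h c (by simp)
        have : ¬ (c = '+' ∨ c = '-') := by rcases hc with h | h <;> subst h <;> decide
        simp [this]

lemma pv_parse_replicate_zero_append (m : Nat) (cs : List Char) :
    pvParseBin (List.replicate m '0' ++ cs) = pvParseBin cs := by
  rw [pv_parse_append]
  have : pvParseBin (List.replicate m '0') = 0 := by
    induction m with
    | zero => simp [pvParseBin]
    | succ t iht =>
        rw [List.replicate_succ]
        simp only [pv_parseBin_eq, List.foldl_cons] at *
        have : pvBinStep 0 '0' = 0 := by decide
        rw [this]; exact iht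
  simp [this]

-- parse of a prefix: top bits
lemma pv_parse_take (cs : List Char) (h : pvIsBinL cs) (m : Nat) (hm : m ≤ cs.length) :
    pvParseBin (cs.take m) = pvParseBin cs / 2 ^ (cs.length - m) := by
  have hsplit : cs = cs.take m ++ cs.drop m := (List.take_append_drop m cs).symm
  have hlen : (cs.drop m).length = cs.length - m := by simp
  have hdb : pvIsBinL (cs.drop m) := fun c hc => h c (List.mem_of_mem_drop hc)
  have hlt : pvParseBin (cs.drop m) < 2 ^ (cs.length - m) := by
    have := pv_parse_lt (cs.drop m) hdb
    rwa [hlen] at this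
  conv_rhs => rw [hsplit]
  rw [pv_parse_append, hlen]
  simp only [List.take_append_drop]
  rw [Nat.mul_comm, Nat.mul_add_div (by positivity), Nat.div_eq_of_lt hlt]
  omega

-- parse of a suffix: low bits
lemma pv_parse_drop (cs : List Char) (h : pvIsBinL cs) (m : Nat) (hm : m ≤ cs.length) :
    pvParseBin (cs.drop m) = pvParseBin cs % 2 ^ (cs.length - m) := by
  have hsplit : cs = cs.take m ++ cs.drop m := (List.take_append_drop m cs).symm
  have hlen : (cs.drop m).length = cs.length - m := by simp
  have hdb : pvIsBinL (cs.drop m) := fun c hc => h c (List.mem_of_mem_drop hc)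
  have hlt : pvParseBin (cs.drop m) < 2 ^ (cs.length - m) := by
    have := pv_parse_lt (cs.drop m) hdb
    rwa [hlen] at this
  conv_rhs => rw [hsplit]
  rw [pv_parse_append, hlen]
  simp only [List.take_append_drop]
  rw [Nat.mul_comm, Nat.mul_add_mod, Nat.mod_eq_of_lt hlt]

-- A's pixel-string expression equals B's
lemma pv_pixstr (s : String) (L : Int) (hL : L ≠ 0) (pad : Bool) :
    (if (if pad then L else 0) ≠ 0 then PySem.Str.zfill s (if pad then L else 0) else s)
      = (if pad then PySem.Str.zfill s L else s) := by
  cases pad <;> simp [hL]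

lemma pv_join2 (a b : String) : PySem.Str.join "-" [a, b] = a ++ "-" ++ b := by
  apply String.toList_inj.mp
  simp [PySem.Str.join, PySem.Chars.join_cons_cons, PySem.Chars.join_singleton,
    String.toList_append, String.toList_ofList]

lemma pv_join3 (a b c : String) : PySem.Str.join "-" [a, b, c] = a ++ "-" ++ b ++ "-" ++ c := by
  apply String.toList_inj.mp
  simp [PySem.Str.join, PySem.Chars.join_cons_cons, PySem.Chars.join_singleton,
    String.toList_append, String.toList_ofList]

lemma pv_join4 (a b c d : String) :
    PySem.Str.join "-" [a, b, c, d] = a ++ "-" ++ b ++ "-" ++ c ++ "-" ++ d := by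
  apply String.toList_inj.mp
  simp [PySem.Str.join, PySem.Chars.join_cons_cons, PySem.Chars.join_singleton,
    String.toList_append, String.toList_ofList]


-- ---- facts about B's padded bit string for p < 12 * 4^k ----

lemma pv_lt_two_pow (k p : Nat) (hp : p < 12 * 4 ^ k) : p < 2 ^ (2 * k + 4) := by
  have h4 : (4 : Nat) ^ k = 2 ^ (2 * k) := by
    rw [pow_mul]; norm_num
  have h16 : (2 : Nat) ^ (2 * k + 4) = 4 ^ k * 16 := by
    rw [pow_add, h4]; norm_num
  have h12 : 12 * 4 ^ k ≤ 16 * 4 ^ k := Nat.mul_le_mul_right _ (by norm_num)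
  omega

lemma pv_bits_eq (k p : Nat) (hp : p < 12 * 4 ^ k) :
    PySem.Chars.zfill (pvBin p) (2 * (k : Int) + 4)
      = List.replicate (2 * k + 4 - (pvBin p).length) '0' ++ pvBin p := by
  have h := pv_zfill_bin (pvBin p) (2 * (k : Int) + 4) (pvBin_isBin p) (pvBin_ne_nil p)
  have ht : (2 * (k : Int) + 4).toNat = 2 * k + 4 := by omega
  rw [h, ht]

lemma pv_bits_len (k p : Nat) (hp : p < 12 * 4 ^ k) :
    (PySem.Chars.zfill (pvBin p) (2 * (k : Int) + 4)).length = 2 * k + 4 := by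
  rw [pv_bits_eq k p hp]
  have hle := pvBin_len_le (2 * k + 4) p (by omega) (pv_lt_two_pow k p hp)
  simp
  omega

lemma pv_bits_isBin (k p : Nat) (hp : p < 12 * 4 ^ k) :
    pvIsBinL (PySem.Chars.zfill (pvBin p) (2 * (k : Int) + 4)) := by
  rw [pv_bits_eq k p hp]
  intro c hc
  rcases List.mem_append.mp hc with h | h
  · left; exact List.eq_of_mem_replicate h
  · exact pvBin_isBin p c h

lemma pv_bits_val (k p : Nat) (hp : p < 12 * 4 ^ k) :
    pvParseBin (PySem.Chars.zfill (pvBin p) (2 * (k : Int) + 4)) = p := by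
  rw [pv_bits_eq k p hp, pv_parse_replicate_zero_append, pvBin_val]

-- the top four bits are A's face value
lemma pv_face_val (k p : Nat) (hp : p < 12 * 4 ^ k) :
    pvParseBin (PySem.List.slice (PySem.Chars.zfill (pvBin p) (2 * (k : Int) + 4)) none (some 4))
      = p / 4 ^ k := by
  have h4 : ((4 : Int)).toNat = 4 := rfl
  rw [PySem.List.slice_to _ (by norm_num), h4]
  rw [pv_parse_take _ (pv_bits_isBin k p hp) 4 (by rw [pv_bits_len k p hp]; omega)]
  rw [pv_bits_val k p hp, pv_bits_len k p hp]
  have he : 2 * k + 4 - 4 = 2 * k := by omega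
  have h4k : (4 : Nat) ^ k = 2 ^ (2 * k) := by rw [pow_mul]; norm_num
  rw [he, ← h4k]

-- the i-th two-bit slice is A's (k-1-i)-th child value
lemma pv_child_val (k p i : Nat) (hp : p < 12 * 4 ^ k) (hi : i < k) :
    pvParseBin (PySem.List.slice (PySem.Chars.zfill (pvBin p) (2 * (k : Int) + 4))
        (some ((4 + 2 * i : Nat) : Int)) (some ((6 + 2 * i : Nat) : Int)))
      = p / 4 ^ (k - 1 - i) % 4 := by
  set cs := PySem.Chars.zfill (pvBin p) (2 * (k : Int) + 4) with hcs
  have hlen := pv_bits_len k p hp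
  have hbin := pv_bits_isBin k p hp
  rw [PySem.List.slice_natCast]
  have h2 : 6 + 2 * i - (4 + 2 * i) = 2 := by omega
  rw [h2]
  have hdb : pvIsBinL (cs.drop (4 + 2 * i)) := fun c hc => hbin c (List.mem_of_mem_drop hc)
  have hdlen : (cs.drop (4 + 2 * i)).length = 2 * k - 2 * i := by
    rw [List.length_drop, hlen]; omega
  rw [pv_parse_take _ hdb 2 (by omega)]
  rw [pv_parse_drop _ hbin (4 + 2 * i) (by omega)]
  rw [pv_bits_val k p hp, hlen, hdlen]
  have he1 : 2 * k + 4 - (4 + 2 * i) = 2 * k - 2 * i := by omega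
  have he2 : 2 * k - 2 * i - 2 = 2 * (k - 1 - i) := by omega
  have he3 : 2 * k - 2 * i = 2 * (k - 1 - i) + 2 := by omega
  rw [he1, he2, he3]
  have hmul : (2 : Nat) ^ (2 * (k - 1 - i) + 2) = 2 ^ (2 * (k - 1 - i)) * 4 := by
    rw [pow_add]; norm_num
  rw [hmul, Nat.mod_mul_right_div_self]
  have h4k : (4 : Nat) ^ (k - 1 - i) = 2 ^ (2 * (k - 1 - i)) := by rw [pow_mul]; norm_num
  rw [← h4k]

-- Nat div/mod cast to A's Python floordiv/mod
lemma pv_cast_dm (p e : Nat) :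
    ((p / 4 ^ e % 4 : Nat) : Int) = PySem.Int.mod (PySem.Int.floordiv (p : Int) ((4 : Int) ^ e)) 4 := by
  rw [PySem.Int.floordiv_eq_ediv_of_pos (by positivity), PySem.Int.mod_eq_emod_of_pos (by norm_num)]
  push_cast
  rfl

lemma pv_cast_div (p e : Nat) :
    ((p / 4 ^ e : Nat) : Int) = PySem.Int.floordiv (p : Int) ((4 : Int) ^ e) := by
  rw [PySem.Int.floordiv_eq_ediv_of_pos (by positivity)]
  push_cast
  rfl

-- B's list of child strings is A's (children, built most-significant first) mapped to strings
lemma pv_children_eq (k p : Nat) (hp : p < 12 * 4 ^ k) :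
    (List.range k).map (fun i =>
        PySem.Int.toStr ((pvParseBin (PySem.List.slice (PySem.Chars.zfill (pvBin p) (2 * (k : Int) + 4))
          (some ((4 + 2 * i : Nat) : Int)) (some ((6 + 2 * i : Nat) : Int))) : Nat) : Int))
      = (((List.range k).map (fun i => PySem.Int.mod (PySem.Int.floordiv (p : Int) ((4 : Int) ^ i)) 4)).reverse).map PySem.Int.toStr := by
  have hlists : (List.range k).map (fun i =>
        ((pvParseBin (PySem.List.slice (PySem.Chars.zfill (pvBin p) (2 * (k : Int) + 4))
          (some ((4 + 2 * i : Nat) : Int)) (some ((6 + 2 * i : Nat) : Int))) : Nat) : Int))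
      = ((List.range k).map (fun i => PySem.Int.mod (PySem.Int.floordiv (p : Int) ((4 : Int) ^ i)) 4)).reverse := by
    apply List.ext_getElem
    · simp
    · intro j h1 h2
      have hj : j < k := by simpa using h1
      simp only [List.getElem_map, List.getElem_range, List.getElem_reverse, List.length_map,
        List.length_range, List.length_reverse]
      rw [pv_child_val k p j hp hj, pv_cast_dm]
  rw [← hlists, List.map_map]
  rfl

-- ===== VERDICT (by name: the statement is the Claim_ definition above) =====
set_option maxHeartbeats 1000000 in
theorem generate_healpix_zone_name_spec : Claim_equal_generate_healpix_zone_name := by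
  intro nside pix nest hierarchical prefix_ pad_pix hdom hpre
  unfold Spec_generate_healpix_zone_name
  obtain ⟨hn0, hns, hp0, hplt, hhn⟩ := hpre
  obtain ⟨k, rfl⟩ : ∃ k : Nat, nside = (2 : Int) ^ k := ⟨_, hns.symm⟩
  obtain ⟨p, rfl⟩ := Int.eq_ofNat_of_zero_le hp0
  have hband := pv_band_pow k
  have hbitlen := pv_bitLength_pow k
  have hpos : (0 : Int) < 2 ^ k := by positivity
  have hlog : Nat.log2 ((2 : Int) ^ k).toNat = k := by
    have hc : ((2 : Int) ^ k).toNat = 2 ^ k := by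
      rw [show ((2 : Int) ^ k) = ((2 ^ k : Nat) : Int) by push_cast; ring, Int.toNat_natCast]
    rw [hc, Nat.log2_two_pow]
  have hpNat : p < 12 * 4 ^ k := by
    have h4 : ((4 : Int)) ^ k = ((2 : Int) ^ k) ^ 2 := by
      rw [show (4 : Int) = 2 ^ 2 by norm_num, ← pow_mul, ← pow_mul, mul_comm]
    have hc : ((12 * 4 ^ k : Nat) : Int) = 12 * ((2 : Int) ^ k) ^ 2 := by push_cast; rw [h4]
    have h := hplt
    rw [← hc] at h
    exact_mod_cast h
  have h2 : (12 : Int) * (2 : Int) ^ k * (2 : Int) ^ k = 12 * ((2 : Int) ^ k) ^ 2 := by ring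
  have c1 : pvIsPowerOfTwo ((2 : Int) ^ k) = true := by
    unfold pvIsPowerOfTwo; simp [hpos, hband]
  have c2 : ¬((2 : Int) ^ k ≤ 0 ∨ PySem.Int.band ((2 : Int) ^ k) ((2 : Int) ^ k - 1) ≠ 0) := by
    rintro (h | h)
    · omega
    · exact h hband
  have c3 : (0 ≤ (p : Int) ∧ (p : Int) < 12 * ((2 : Int) ^ k) ^ 2) := ⟨hp0, hplt⟩
  have hps := pv_pixstr (PySem.Int.toStr (p : Int))
    (PySem.Str.len (PySem.Int.toStr (12 * ((2 : Int) ^ k) ^ 2 - 1)))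
    (pv_len_toStr_ne _) pad_pix
  have e1 : ("-pix" : String).toList = ("-" : String).toList ++ ("pix" : String).toList := rfl
  have e2 : ("_nest" : String).toList = ("_" : String).toList ++ ("nest" : String).toList := rfl
  have e3 : ("_ring" : String).toList = ("_" : String).toList ++ ("ring" : String).toList := rfl
  have e4 : ("-f" : String).toList = ("-" : String).toList ++ ("f" : String).toList := rfl
  have e5 : ("-c" : String).toList = ("-" : String).toList ++ ("c" : String).toList := rfl
  have hne : PySem.Int.toChars (12 * ((2 : Int) ^ k) ^ 2 - 1) ≠ [] := by
    have h := pv_toStr_toList_ne_nil (12 * ((2 : Int) ^ k) ^ 2 - 1)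
    rwa [PySem.Int.toList_toStr] at h
  cases hierarchical with
  | false =>
      unfold generate_healpix_zone_name generate_healpix_zone_name_alt
      cases nest <;> cases pad_pix <;>
        (simp [c1, c2, c3, h2, hne, pv_join2]
         refine String.toList_inj.mp ?_
         simp [String.toList_append, e1, e2, e3])
  | true =>
      have hnest := hhn rfl
      subst hnest
      have hlev : (if (2 : Int) ^ k > 1 then ((Nat.log2 ((2 : Int) ^ k).toNat : Nat) : Int) else 0) = (k : Int) := by
        rcases Nat.eq_zero_or_pos k with hk0 | hkpos
        · subst hk0; norm_num
        · rw [if_pos (one_lt_pow₀ (show (1 : Int) < 2 by norm_num) hkpos.ne'), hlog]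
      have hch : List.foldl
            (fun acc j => acc ++ [PySem.Int.mod (PySem.Int.floordiv (↑p) ((4 : Int) ^ (j - 1).toNat)) 4]) []
            (PySem.List.pyRange (k : Int) 0 (-1))
          = ((List.range k).map (fun i => PySem.Int.mod (PySem.Int.floordiv (p : Int) ((4 : Int) ^ i)) 4)).reverse := by
        have hks : ((k : Int) + 1 - (0 + 1)).toNat = k := by omega
        rw [PySem.List.foldl_append_singleton_eq_map, PySem.List.pyRange_neg_one_eq_reverse,
          List.map_reverse, List.nil_append, PySem.List.pyRange_one, List.map_map, hks]
        congr 1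
        apply List.map_congr_left
        intro i hi
        simp only [Function.comp]
        have h5 : ((0 + 1 + (i : Int)) - 1).toNat = i := by omega
        rw [h5]
      have hmap := pv_children_eq k p hpNat
      have hface : ((pvParseBin (PySem.List.slice (PySem.Chars.zfill (pvBin p) (2 * (k : Int) + 4)) none (some 4)) : Nat) : Int)
          = (if (k : Int) > 0 then PySem.Int.floordiv (↑p) ((4 : Int) ^ ((k : Int)).toNat) else (↑p : Int)) := by
        rw [pv_face_val k p hpNat, pv_cast_div]
        rcases Nat.eq_zero_or_pos k with hk0 | hkpos
        · subst hk0
          simp [PySem.Int.floordiv_eq_ediv_of_pos (show (0 : Int) < 1 by norm_num)]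
        · rw [if_pos (by exact_mod_cast hkpos), Int.toNat_natCast]
      unfold generate_healpix_zone_name generate_healpix_zone_name_alt
      rcases Nat.eq_zero_or_pos k with hk0 | hkpos
      · subst hk0
        have h12 : (p : Int) < 12 := by simpa using hplt
        have g1 : pvIsPowerOfTwo 1 = true := by decide
        have g2 : PySem.Int.toChars (11 : Int) ≠ [] := by decide
        have g4 : ¬((p : Int) < 0 ∨ 12 ≤ (p : Int)) := by omega
        have g5 : ¬((p : Int) < 0) := not_lt.mpr hp0
        simp only [hlev, Int.toNat_natCast, hch, hbitlen, Nat.add_sub_cancel, List.nil_append] at *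
        simp only [hface]
        cases pad_pix <;>
          simp [g1, g2, g4, g5, h12, pv_join3, ← String.toList_inj,
            String.toList_append, e1, e2, e3, e4]
      · have hkne : k ≠ 0 := hkpos.ne'
        simp only [hlev, Int.toNat_natCast, hch, hbitlen, Nat.add_sub_cancel, List.nil_append] at *
        simp only [hface, hmap]
        cases pad_pix <;>
          simp [c1, c2, c3, h2, hne, hkne, hkpos, pv_join4, ← String.toList_inj,
            String.toList_append, e1, e2, e3, e4, e5]
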